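-- pv_equiv track=rewrite | github.com/Shadow880/DLP-Guardian | engine/fuzzy_detector.py | normalise_evasion
-- ===== SOURCE A (Python) =====
-- def normalise_evasion(text: str) -> str:
--     """Normalise common character substitutions used to evade detection."""
--     replacements = {
--         '0': 'o', '1': 'i', '3': 'e', '4': 'a',
--         '5': 's', '@': 'a', '$': 's', '!': 'i',
--         '+': 't', '&': 'and'
--     }
--     result = text.lower()
--     for char, replacement in replacements.items():
--         result = result.replace(char, replacement)
--     return result
-- ===== SOURCE B (Python) =====
-- def normalise_evasion(text: str) -> str:
--     """Normalise common character substitutions used to evade detection."""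
--     pieces = []
--     for ch in text:
--         c = ch.lower()
--         if c == '0':
--             pieces.append('o')
--         elif c == '1':
--             pieces.append('i')
--         elif c == '3':
--             pieces.append('e')
--         elif c == '4':
--             pieces.append('a')
--         elif c == '5':
--             pieces.append('s')
--         elif c == '@':
--             pieces.append('a')
--         elif c == '$':
--             pieces.append('s')
--         elif c == '!':
--             pieces.append('i')
--         elif c == '+':
--             pieces.append('t')
--         elif c == '&':
--             pieces.append('and')
--         else:
--             pieces.append(c)
--     return ''.join(pieces)
-- ===== Notes on version B (the rewrite author's own statement) =====
-- stated objective: idiomatic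
-- what changed: Replaces A's ten sequential full-string .replace() scans and its substitution dict with a single explicit loop over the characters that lowercases each character, runs an if/elif chain of the ten rules, and joins the accumulated pieces.
import Mathlib
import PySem

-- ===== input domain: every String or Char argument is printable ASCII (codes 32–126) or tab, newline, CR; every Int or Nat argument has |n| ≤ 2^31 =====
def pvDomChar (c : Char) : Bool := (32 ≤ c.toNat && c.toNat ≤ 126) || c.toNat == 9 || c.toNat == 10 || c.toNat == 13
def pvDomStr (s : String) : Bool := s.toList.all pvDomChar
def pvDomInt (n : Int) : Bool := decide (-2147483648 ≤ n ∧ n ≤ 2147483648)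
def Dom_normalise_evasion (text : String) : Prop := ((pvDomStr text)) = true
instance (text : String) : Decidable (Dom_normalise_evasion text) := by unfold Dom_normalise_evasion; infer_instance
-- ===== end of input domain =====

-- B replaces A's ten sequential full-string replace passes (and its dict) with one
-- explicit loop that lowercases each character, runs an if/elif chain of the ten
-- rules, and joins the accumulated pieces (idiomatic single pass).

-- ===== PORT A =====
def normalise_evasion (text : String) : String :=
  let replacements : PySem.Dict String String :=
    PySem.Dict.mk [("0","o"),("1","i"),("3","e"),("4","a"),("5","s"),
                   ("@","a"),("$","s"),("!","i"),("+","t"),("&","and")]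
  replacements.items.foldl (fun result p => PySem.Str.replace result p.1 p.2)
    (PySem.Str.lower text)

-- ===== PORT B =====
-- the loop body of Source B: lowercase the character, then the if/elif chain appends one piece
def pvAltGo : List Char → List String → List String
  | [], pieces => pieces
  | ch :: t, pieces =>
    let c := PySem.Chars.lowerChar ch
    pvAltGo t (pieces ++
      [if c = '0' then "o" else
       if c = '1' then "i" else
       if c = '3' then "e" else
       if c = '4' then "a" else
       if c = '5' then "s" else
       if c = '@' then "a" else
       if c = '$' then "s" else
       if c = '!' then "i" else
       if c = '+' then "t" else
       if c = '&' then "and" else String.ofList [c]])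

def normalise_evasion_alt (text : String) : String :=
  PySem.Str.join "" (pvAltGo text.toList [])

-- ===== PRECONDITION & SPEC =====
def Spec_normalise_evasion (text : String) (out : String) : Prop := out = normalise_evasion_alt text
instance (text : String) (out : String) : Decidable (Spec_normalise_evasion text out) := by unfold Spec_normalise_evasion; infer_instance

-- ===== CLAIM (what is proved, stated in full; the proofs are below) =====
def Claim_equal_normalise_evasion : Prop := ∀ (text : String), Dom_normalise_evasion text → Spec_normalise_evasion text (normalise_evasion text)

-- ===== LEMMAS AND PROOFS =====

/-- one single-character substitution rule applied to one character -/
def pvG (c : Char) (new : List Char) (x : Char) : List Char := if x = c then new else [x]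

/-- the whole substitution table applied to one character -/
def pvSub (x : Char) : List Char :=
  if x = '0' then ['o'] else if x = '1' then ['i'] else if x = '3' then ['e'] else
  if x = '4' then ['a'] else if x = '5' then ['s'] else if x = '@' then ['a'] else
  if x = '$' then ['s'] else if x = '!' then ['i'] else if x = '+' then ['t'] else
  if x = '&' then ['a','n','d'] else [x]

theorem pvGo_single (c : Char) (new : List Char) :
    ∀ (l : List Char) (fuel : Nat) (acc : List Char), l.length ≤ fuel →
      PySem.Chars.replace.go [c] new fuel l acc = acc.reverse ++ l.flatMap (pvG c new) := by
  intro l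
  induction l with
  | nil => intro fuel acc _; cases fuel <;> simp [PySem.Chars.replace.go]
  | cons x t ih =>
    intro fuel acc h
    cases fuel with
    | zero => simp at h
    | succ f =>
      rw [PySem.Chars.replace.go]
      by_cases hx : x = c
      · subst hx
        simp only [List.isPrefixOf, beq_self_eq_true, Bool.true_and, if_true, List.length_singleton,
          List.drop_succ_cons, List.drop_zero]
        rw [ih f (new.reverse ++ acc) (by simpa using h)]
        simp [pvG]
      · have hb : ([c].isPrefixOf (x :: t)) = false := by
          simp [List.isPrefixOf]
          exact fun hh => hx hh.symm
        rw [hb]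
        simp only [Bool.false_eq_true, if_false]
        rw [ih f (x :: acc) (by simpa using h)]
        simp [pvG, hx]

theorem pvReplace_single (cs : List Char) (c : Char) (new : List Char) :
    PySem.Chars.replace cs [c] new = cs.flatMap (pvG c new) := by
  rw [PySem.Chars.replace]
  simp [pvGo_single c new cs cs.length [] le_rfl]

/-- A's ten chained replaces, on the list side -/
def pvChain (cs : List Char) : List Char :=
  (((((((((cs.flatMap (pvG '0' ['o'])).flatMap (pvG '1' ['i'])).flatMap (pvG '3' ['e'])).flatMap
    (pvG '4' ['a'])).flatMap (pvG '5' ['s'])).flatMap (pvG '@' ['a'])).flatMap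
    (pvG '$' ['s'])).flatMap (pvG '!' ['i'])).flatMap (pvG '+' ['t'])).flatMap (pvG '&' ['a','n','d'])

theorem pvChain_append (a b : List Char) : pvChain (a ++ b) = pvChain a ++ pvChain b := by
  simp [pvChain, List.flatMap_append]

theorem pvChain_single (x : Char) : pvChain [x] = pvSub x := by
  by_cases h0 : x = '0'; · subst h0; decide
  by_cases h1 : x = '1'; · subst h1; decide
  by_cases h3 : x = '3'; · subst h3; decide
  by_cases h4 : x = '4'; · subst h4; decide
  by_cases h5 : x = '5'; · subst h5; decide
  by_cases h6 : x = '@'; · subst h6; decide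
  by_cases h7 : x = '$'; · subst h7; decide
  by_cases h8 : x = '!'; · subst h8; decide
  by_cases h9 : x = '+'; · subst h9; decide
  by_cases ha : x = '&'; · subst ha; decide
  simp [pvChain, pvSub, pvG, h0, h1, h3, h4, h5, h6, h7, h8, h9, ha]

theorem pvChain_eq (cs : List Char) : pvChain cs = cs.flatMap pvSub := by
  induction cs with
  | nil => simp [pvChain]
  | cons x t ih =>
    have : x :: t = [x] ++ t := rfl
    rw [this, pvChain_append, pvChain_single, ih, List.flatMap_append,
      List.flatMap_cons, List.flatMap_nil, List.append_nil]

theorem pvA_toList (text : String) :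
    (normalise_evasion text).toList = (PySem.Chars.lower text.toList).flatMap pvSub := by
  rw [← pvChain_eq]
  simp only [normalise_evasion, List.foldl_cons, List.foldl_nil]
  simp only [PySem.Str.toList_replace, PySem.Str.toList_lower,
    show ("0":String).toList = ['0'] from rfl, show ("o":String).toList = ['o'] from rfl,
    show ("1":String).toList = ['1'] from rfl, show ("i":String).toList = ['i'] from rfl,
    show ("3":String).toList = ['3'] from rfl, show ("e":String).toList = ['e'] from rfl,
    show ("4":String).toList = ['4'] from rfl, show ("a":String).toList = ['a'] from rfl,
    show ("5":String).toList = ['5'] from rfl, show ("s":String).toList = ['s'] from rfl,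
    show ("@":String).toList = ['@'] from rfl, show ("$":String).toList = ['$'] from rfl,
    show ("!":String).toList = ['!'] from rfl, show ("+":String).toList = ['+'] from rfl,
    show ("t":String).toList = ['t'] from rfl, show ("&":String).toList = ['&'] from rfl,
    show ("and":String).toList = ['a','n','d'] from rfl]
  simp only [pvReplace_single, pvChain]

/-- the piece Source B's if/elif chain emits for one original character -/
def pvPiece (ch : Char) : String :=
  let c := PySem.Chars.lowerChar ch
  if c = '0' then "o" else if c = '1' then "i" else if c = '3' then "e" else
  if c = '4' then "a" else if c = '5' then "s" else if c = '@' then "a" else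
  if c = '$' then "s" else if c = '!' then "i" else if c = '+' then "t" else
  if c = '&' then "and" else String.ofList [c]

theorem pvAltGo_eq (l : List Char) : ∀ (pieces : List String),
    pvAltGo l pieces = pieces ++ l.map pvPiece := by
  induction l with
  | nil => intro pieces; simp [pvAltGo]
  | cons ch t ih =>
    intro pieces
    rw [pvAltGo, ih]
    simp [pvPiece]

theorem pvPiece_toList (ch : Char) :
    (pvPiece ch).toList = pvSub (PySem.Chars.lowerChar ch) := by
  rw [pvPiece, pvSub]
  set c := PySem.Chars.lowerChar ch with hc
  by_cases h0 : c = '0'; · simp [h0]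
  by_cases h1 : c = '1'; · simp [h1]
  by_cases h3 : c = '3'; · simp [h3]
  by_cases h4 : c = '4'; · simp [h4]
  by_cases h5 : c = '5'; · simp [h5]
  by_cases h6 : c = '@'; · simp [h6]
  by_cases h7 : c = '$'; · simp [h7]
  by_cases h8 : c = '!'; · simp [h8]
  by_cases h9 : c = '+'; · simp [h9]
  by_cases ha : c = '&'; · simp [ha]
  simp [h0, h1, h3, h4, h5, h6, h7, h8, h9, ha]

theorem pvJoin_nil_flatten (l : List (List Char)) : PySem.Chars.join [] l = l.flatten := by
  show List.intercalate [] l = l.flatten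
  induction l with
  | nil => simp [List.intercalate]
  | cons a t ih => cases t <;> simp_all [List.intercalate, List.intersperse]

theorem pvB_toList (text : String) :
    (normalise_evasion_alt text).toList = (PySem.Chars.lower text.toList).flatMap pvSub := by
  simp only [normalise_evasion_alt, PySem.Str.toList_join,
    show ("":String).toList = [] from rfl, pvJoin_nil_flatten,
    pvAltGo_eq, List.nil_append, List.map_map, Function.comp_def, pvPiece_toList]
  simp [PySem.Chars.lower, List.flatMap_def, List.map_map, Function.comp_def]

-- ===== VERDICT (by name: the statement is the Claim_ definition above) =====
theorem normalise_evasion_spec : Claim_equal_normalise_evasion := by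
  intro text _
  unfold Spec_normalise_evasion
  exact String.toList_inj.mp (by rw [pvA_toList, pvB_toList])
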